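-- pv_equiv track=rewrite | github.com/vvpresents/NGCmod | NGCmod/parser.py | get_server_directive_id
-- ===== SOURCE A (Python) =====
-- def get_server_directive_id (i, directives_list):
--     k = i + 1
--     server_directive_id = { 'listen': [], 'server_name':[] }
--     while (k < len(directives_list)) and directives_list[k][1] <= directives_list[i][1]:
--         if directives_list[k][3] == 'listen':
--             server_directive_id['listen'].extend(directives_list[k][4:])
--         elif directives_list[k][3] == 'server_name':
--             server_directive_id['server_name'].extend(directives_list[k][4:])
--         k += 1
--     return server_directive_id
-- ===== SOURCE B (Python) =====
-- def get_server_directive_id(i, directives_list):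
--     # boundary pass: take the block of rows after i whose column 1 stays <= row i's column 1
--     block = []
--     if i + 1 < len(directives_list):
--         bound = directives_list[i][1]
--         for row in directives_list[i + 1:]:
--             if row[1] > bound:
--                 break
--             block.append(row)
--     # two grouping passes over the block
--     return {
--         'listen': [x for row in block if row[3] == 'listen' for x in row[4:]],
--         'server_name': [x for row in block if row[3] == 'server_name' for x in row[4:]],
--     }
-- ===== Notes on version B (the rewrite author's own statement) =====
-- stated objective: alternative
-- what changed: Replaces A's single interleaved index-driven while-loop (which walks k and mutates both dict entries as it scans) with a separate boundary pass that materialises the block (slice + take-while-with-break) followed by two independent grouping comprehensions, one per key.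
import Mathlib
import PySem

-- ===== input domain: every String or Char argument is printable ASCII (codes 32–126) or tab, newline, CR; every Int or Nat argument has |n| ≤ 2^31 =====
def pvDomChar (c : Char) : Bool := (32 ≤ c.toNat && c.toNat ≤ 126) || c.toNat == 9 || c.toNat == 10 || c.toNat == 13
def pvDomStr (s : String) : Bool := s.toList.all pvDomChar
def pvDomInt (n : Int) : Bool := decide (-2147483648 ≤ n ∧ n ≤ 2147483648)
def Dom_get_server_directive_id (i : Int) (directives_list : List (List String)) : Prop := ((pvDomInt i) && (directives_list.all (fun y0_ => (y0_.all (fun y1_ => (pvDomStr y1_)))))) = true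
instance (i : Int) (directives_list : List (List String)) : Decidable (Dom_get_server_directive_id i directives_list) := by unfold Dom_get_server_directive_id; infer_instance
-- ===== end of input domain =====

-- B separates boundary detection (slice + take-while) from grouping (two per-key passes),
-- replacing A's single interleaved index-driven while-loop; alternative decomposition, same cost.


-- ===== PORT A =====
-- while (k < len) and dl[k][1] <= dl[i][1]: … ; k += 1    (fuel = dl.length bounds the iterations
-- for the k ≥ 1 starts admitted by Pre_; row accesses via pyGet?, default only reached off Pre_)
def pvALoop (dl : List (List String)) (i : Int) (fuel : Nat) (k : Int)
    (listen server_name : List String) : List String × List String :=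
  match fuel with
  | 0 => (listen, server_name)
  | fuel + 1 =>
    if k < (dl.length : Int) ∧
        ((PySem.List.pyGet? dl k).getD []).getD 1 "" ≤ ((PySem.List.pyGet? dl i).getD []).getD 1 "" then
      let row := (PySem.List.pyGet? dl k).getD []
      if row.getD 3 "" = "listen" then
        pvALoop dl i fuel (k + 1) (listen ++ PySem.List.slice row (some 4) none) server_name
      else if row.getD 3 "" = "server_name" then
        pvALoop dl i fuel (k + 1) listen (server_name ++ PySem.List.slice row (some 4) none)
      else
        pvALoop dl i fuel (k + 1) listen server_name
    else (listen, server_name)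

def get_server_directive_id (i : Int) (directives_list : List (List String)) : List (String × List String) :=
  let r := pvALoop directives_list i directives_list.length (i + 1) [] []
  [("listen", r.1), ("server_name", r.2)]

-- ===== PORT B =====
-- the for-row-with-break boundary pass of Source B
def pvTakeBlock (bound : String) (rows : List (List String)) : List (List String) :=
  match rows with
  | [] => []
  | row :: rest =>
    if bound < row.getD 1 "" then []
    else row :: pvTakeBlock bound rest

-- one grouping comprehension: [x for row in block if row[3] == key for x in row[4:]]
def pvGroup (key : String) (block : List (List String)) : List String :=
  (block.filter (fun row => row.getD 3 "" == key)).flatMap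
    (fun row => PySem.List.slice row (some 4) none)

def get_server_directive_id_alt (i : Int) (directives_list : List (List String)) : List (String × List String) :=
  let block :=
    if i + 1 < (directives_list.length : Int) then
      pvTakeBlock (((PySem.List.pyGet? directives_list i).getD []).getD 1 "")
        (PySem.List.slice directives_list (some (i + 1)) none)
    else []
  [("listen", pvGroup "listen" block), ("server_name", pvGroup "server_name" block)]

-- ===== PRECONDITION & SPEC =====
-- When i + 1 < len the loop runs: Pre_ then excludes negative i, where A's negative-index
-- wraparound walks tail rows and then restarts at the head (revisiting rows; very negative i
-- raises IndexError) — outside the function's natural domain — and inputs containing rows shorter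
-- than 4 entries, on which A raises IndexError when it visits such a row (a few such inputs where
-- the block happens to stop before the short row still return; see the cites).
def Pre_get_server_directive_id (i : Int) (directives_list : List (List String)) : Prop :=
  (directives_list.length : Int) ≤ i + 1 ∨ (0 ≤ i ∧ ∀ row ∈ directives_list, 4 ≤ row.length)
instance (i : Int) (directives_list : List (List String)) : Decidable (Pre_get_server_directive_id i directives_list) := by unfold Pre_get_server_directive_id; infer_instance
def pvWitness_get_server_directive_id : Int × List (List String) :=
  (0, [["s", "b", ";", "x", "y"], ["s", "a", ";", "listen", "80"], ["s", "a", ";", "server_name", "h"]])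

def Spec_get_server_directive_id (i : Int) (directives_list : List (List String)) (out : List (String × List String)) : Prop := out = get_server_directive_id_alt i directives_list
instance (i : Int) (directives_list : List (List String)) (out : List (String × List String)) : Decidable (Spec_get_server_directive_id i directives_list out) := by unfold Spec_get_server_directive_id; infer_instance

-- ===== CLAIM (what is proved, stated in full; the proofs are below) =====
def Claim_equal_get_server_directive_id : Prop := ∀ (i : Int) (directives_list : List (List String)), Dom_get_server_directive_id i directives_list → Pre_get_server_directive_id i directives_list → Spec_get_server_directive_id i directives_list (get_server_directive_id i directives_list)

-- ===== LEMMAS AND PROOFS =====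

theorem pvALoop_stop (dl : List (List String)) (i : Int) (fuel : Nat) (k : Int)
    (l s : List String) (h : ¬ k < (dl.length : Int)) :
    pvALoop dl i fuel k l s = (l, s) := by
  cases fuel with
  | zero => rfl
  | succ fuel => rw [pvALoop, if_neg (fun hc => h hc.1)]

theorem pvGroup_cons (key : String) (row : List String) (blk : List (List String)) :
    pvGroup key (row :: blk) =
      (if row.getD 3 "" = key then PySem.List.slice row (some 4) none else []) ++ pvGroup key blk := by
  simp [pvGroup, List.filter_cons]
  split_ifs <;> simp_all

theorem pvALoop_eq (dl : List (List String)) (i : Int) :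
    ∀ (fuel k : Nat) (l s : List String), dl.length ≤ k + fuel →
      pvALoop dl i fuel (k : Int) l s =
        (l ++ pvGroup "listen" (pvTakeBlock (((PySem.List.pyGet? dl i).getD []).getD 1 "") (dl.drop k)),
         s ++ pvGroup "server_name" (pvTakeBlock (((PySem.List.pyGet? dl i).getD []).getD 1 "") (dl.drop k))) := by
  intro fuel
  induction fuel with
  | zero =>
    intro k l s h
    have hdrop : dl.drop k = [] := List.drop_eq_nil_of_le (by omega)
    simp [pvALoop, hdrop, pvTakeBlock, pvGroup]
  | succ fuel ih =>
    intro k l s h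
    by_cases hk : k < dl.length
    · have hget : PySem.List.pyGet? dl (k : Int) = some dl[k] := by
        simp [List.getElem?_eq_getElem hk]
      have hdrop : dl.drop k = dl[k] :: dl.drop (k + 1) := List.drop_eq_getElem_cons hk
      have hcast : (k : Int) + 1 = ((k + 1 : Nat) : Int) := by push_cast; ring
      have ih' : ∀ l' s' : List String, pvALoop dl i fuel ((k : Int) + 1) l' s' =
          (l' ++ pvGroup "listen" (pvTakeBlock (((PySem.List.pyGet? dl i).getD []).getD 1 "") (dl.drop (k + 1))),
           s' ++ pvGroup "server_name" (pvTakeBlock (((PySem.List.pyGet? dl i).getD []).getD 1 "") (dl.drop (k + 1)))) := by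
        intro l' s'
        rw [hcast]
        exact ih (k + 1) l' s' (by omega)
      by_cases hle : (dl[k]).getD 1 "" ≤ ((PySem.List.pyGet? dl i).getD []).getD 1 ""
      · have hblk : pvTakeBlock (((PySem.List.pyGet? dl i).getD []).getD 1 "") (dl.drop k)
            = dl[k] :: pvTakeBlock (((PySem.List.pyGet? dl i).getD []).getD 1 "") (dl.drop (k + 1)) := by
          rw [hdrop, pvTakeBlock, if_neg (not_lt.mpr hle)]
        rw [pvALoop, if_pos ⟨by exact_mod_cast hk, by rw [hget]; exact hle⟩]
        simp only [hget, Option.getD_some]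
        rw [hblk, pvGroup_cons, pvGroup_cons, hcast]
        by_cases h3 : (dl[k]).getD 3 "" = "listen"
        · simp only [List.getD] at h3
          simp [h3, ih', List.append_assoc]
        · by_cases h4 : (dl[k]).getD 3 "" = "server_name"
          · simp only [List.getD] at h3 h4
            simp [h4, ih', List.append_assoc]
          · simp only [List.getD] at h3 h4
            simp [h3, h4, ih']
      · have hblk : pvTakeBlock (((PySem.List.pyGet? dl i).getD []).getD 1 "") (dl.drop k) = [] := by
          rw [hdrop, pvTakeBlock, if_pos (not_le.mp hle)]
        rw [pvALoop, if_neg (by rw [hget]; exact fun hc => hle hc.2), hblk]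
        simp [pvGroup]
    · have hdrop : dl.drop k = [] := List.drop_eq_nil_of_le (by omega)
      rw [pvALoop, if_neg (fun hc => hk (by exact_mod_cast hc.1)), hdrop]
      simp [pvTakeBlock, pvGroup]

-- ===== VERDICT (by name: the statement is the Claim_ definition above) =====
theorem get_server_directive_id_spec : Claim_equal_get_server_directive_id := by
  intro i dl _hdom hpre
  unfold Spec_get_server_directive_id get_server_directive_id get_server_directive_id_alt
  rcases hpre with hbig | ⟨hi, _hrows⟩
  · have hnlt : ¬ (i + 1) < (dl.length : Int) := by omega
    rw [pvALoop_stop dl i dl.length (i + 1) [] [] hnlt]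
    simp [hnlt, pvGroup]
  obtain ⟨n, rfl⟩ := Int.eq_ofNat_of_zero_le hi
  have hcast : (n : Int) + 1 = ((n + 1 : Nat) : Int) := by push_cast; ring
  have hmain := pvALoop_eq dl (n : Int) dl.length (n + 1) [] [] (by omega)
  rw [hcast, hmain]
  by_cases hlt : ((n : Int) + 1) < (dl.length : Int)
  · have hslice : PySem.List.slice dl (some ((n : Int) + 1)) none = dl.drop (n + 1) := by
      rw [hcast, PySem.List.slice_from_natCast]
    simp [hlt, hslice]
  · have hdrop : dl.drop (n + 1) = [] := List.drop_eq_nil_of_le (by omega)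
    simp [hlt, hdrop, pvTakeBlock, pvGroup]
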